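-- pv_equiv track=rewrite | github.com/S0mirun/LDA_PP | program/path_planning/MakeDictionary.py | _decode_row_indices
-- ===== SOURCE A (Python) =====
-- def _decode_row_indices(idx, N, ctx_dims, labels=None):
--     """
--     フラット化行インデックスを元の文脈系列に復元しラベル化して返す。
--     """
--     base = labels or list(range(N))
--     out = []
--     for r in idx:
--         ctx, x = [], int(r)
--         for _ in range(ctx_dims):
--             ctx.append(x % N); x //= N
--         ctx = tuple(base[k] for k in ctx[::-1])
--         out.append(ctx)
--     return out
-- ===== SOURCE B (Python) =====
-- def _decode_row_indices(idx, N, ctx_dims, labels=None):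
--     """
--     フラット化行インデックスを元の文脈系列に復元しラベル化して返す。
--     """
--     base = labels or list(range(N))
--     xs = [int(r) for r in idx]
--     cols = []
--     for _ in range(ctx_dims):
--         cols.append([base[x % N] for x in xs])
--         xs = [x // N for x in xs]
--     cols.reverse()
--     return [tuple(col[j] for col in cols) for j in range(len(idx))]
-- ===== Notes on version B (the rewrite author's own statement) =====
-- stated objective: alternative
-- what changed: A decodes row by row, accumulating each row's digits LSB-first and then reversing; B works column-major: one digit place at a time across all rows (building digit columns), then transposes the reversed columns into the output rows. Pre_ excludes N = 0 when there is decode work to do (A raises ZeroDivisionError), and a base list too short for the digit range (A can raise IndexError there, returning only when every reached digit happens to land inside the list).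
-- outside the precondition, e.g. on _decode_row_indices([2], 5, 1, [7, 8, 9]): A returns [(9,)], B returns [(9,)]; on _decode_row_indices([3], -4, 1, [7, 8]): A returns [(8,)], B returns [(8,)]
import Mathlib
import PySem

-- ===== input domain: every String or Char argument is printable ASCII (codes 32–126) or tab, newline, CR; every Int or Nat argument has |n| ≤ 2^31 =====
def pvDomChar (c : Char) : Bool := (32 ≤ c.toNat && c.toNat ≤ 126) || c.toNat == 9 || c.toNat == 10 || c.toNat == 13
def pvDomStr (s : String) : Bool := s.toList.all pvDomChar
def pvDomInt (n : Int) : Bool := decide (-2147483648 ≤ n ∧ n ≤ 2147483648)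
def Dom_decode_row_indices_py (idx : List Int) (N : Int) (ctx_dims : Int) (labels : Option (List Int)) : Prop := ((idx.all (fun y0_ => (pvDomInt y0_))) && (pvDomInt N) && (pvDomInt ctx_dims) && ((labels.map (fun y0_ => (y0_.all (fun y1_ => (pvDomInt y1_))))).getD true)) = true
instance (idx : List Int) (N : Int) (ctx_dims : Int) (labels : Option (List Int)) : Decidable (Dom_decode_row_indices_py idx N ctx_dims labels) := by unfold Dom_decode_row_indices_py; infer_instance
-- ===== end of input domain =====

-- ===== PORT A =====
-- B replaces A's row-by-row accumulate-digits-then-reverse loop by a column-major pass: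
-- one digit place at a time over all rows, then a transpose (objective: alternative traversal).
def decode_row_indices_py (idx : List Int) (N : Int) (ctx_dims : Int) (labels : Option (List Int)) : List (List Int) :=
  -- base = labels or list(range(N))  (a non-empty labels list is truthy)
  let lb := labels.getD []
  let base : List Int := if lb = [] then PySem.List.pyRange 0 N 1 else lb
  idx.foldl (fun out r =>
    -- ctx, x = [], int(r); for _ in range(ctx_dims): ctx.append(x % N); x //= N
    let s := (PySem.List.pyRange 0 ctx_dims 1).foldl
      (fun (s : List Int × Int) _ =>
        (s.1 ++ [PySem.Int.mod s.2 N], PySem.Int.floordiv s.2 N)) ([], r)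
    -- tuple(base[k] for k in ctx[::-1]); ctx[::-1] is List.reverse (exact: full reverse slice);
    -- base[k]: Pre_ keeps k a valid non-negative index, so pyGetD's default is never taken
    let ctx := s.1.reverse.map (fun k => PySem.List.pyGetD base k 0)
    out ++ [ctx]) []

-- ===== PORT B =====
def decode_row_indices_py_alt (idx : List Int) (N : Int) (ctx_dims : Int) (labels : Option (List Int)) : List (List Int) :=
  let lb := labels.getD []
  let base : List Int := if lb = [] then PySem.List.pyRange 0 N 1 else lb
  -- xs = [int(r) for r in idx]  (int(r) is the identity on ints)
  let xs : List Int := idx.map (fun r => r)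
  -- for _ in range(ctx_dims): cols.append([base[x % N] for x in xs]); xs = [x // N for x in xs]
  let s := (PySem.List.pyRange 0 ctx_dims 1).foldl
    (fun (s : List Int × List (List Int)) _ =>
      (s.1.map (fun x => PySem.Int.floordiv x N),
       s.2 ++ [s.1.map (fun x => PySem.List.pyGetD base (PySem.Int.mod x N) 0)]))
    (xs, [])
  -- cols.reverse()
  let cols := s.2.reverse
  -- [tuple(col[j] for col in cols) for j in range(len(idx))]  (col[j]: 0 ≤ j < len(col) always)
  (PySem.List.pyRange 0 (idx.length : Int) 1).map
    (fun j => cols.map (fun col => PySem.List.pyGetD col j 0))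

-- ===== PRECONDITION & SPEC =====
-- Pre_ excludes: N = 0 when there is decode work to do (A raises ZeroDivisionError), and a base
-- list too short for the digit range (N > len(base) for positive N; len(base) < max(1, -N-1)
-- for negative N): A can raise IndexError there, returning only when every reached digit
-- happens to land inside the list.
def Pre_decode_row_indices_py (idx : List Int) (N : Int) (ctx_dims : Int) (labels : Option (List Int)) : Prop :=
  (N ≠ 0 ∨ idx = [] ∨ ctx_dims ≤ 0) ∧
  (idx ≠ [] → 1 ≤ ctx_dims →
    ((1 ≤ N → N ≤ ((if labels.getD [] = [] then PySem.List.pyRange 0 N 1 else labels.getD []).length : Int)) ∧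
     (N ≤ -1 → 1 ≤ ((if labels.getD [] = [] then PySem.List.pyRange 0 N 1 else labels.getD []).length : Int) ∧
       -N - 1 ≤ ((if labels.getD [] = [] then PySem.List.pyRange 0 N 1 else labels.getD []).length : Int))))
instance (idx : List Int) (N : Int) (ctx_dims : Int) (labels : Option (List Int)) : Decidable (Pre_decode_row_indices_py idx N ctx_dims labels) := by unfold Pre_decode_row_indices_py; infer_instance

def pvWitness_decode_row_indices_py : List Int × Int × Int × Option (List Int) := ([0, 5, 12, 26], 3, 3, none)

def Spec_decode_row_indices_py (idx : List Int) (N : Int) (ctx_dims : Int) (labels : Option (List Int)) (out : List (List Int)) : Prop := out = decode_row_indices_py_alt idx N ctx_dims labels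
instance (idx : List Int) (N : Int) (ctx_dims : Int) (labels : Option (List Int)) (out : List (List Int)) : Decidable (Spec_decode_row_indices_py idx N ctx_dims labels out) := by unfold Spec_decode_row_indices_py; infer_instance

-- ===== CLAIM (what is proved, stated in full; the proofs are below) =====
def Claim_equal_decode_row_indices_py : Prop := ∀ (idx : List Int) (N : Int) (ctx_dims : Int) (labels : Option (List Int)), Dom_decode_row_indices_py idx N ctx_dims labels → Pre_decode_row_indices_py idx N ctx_dims labels → Spec_decode_row_indices_py idx N ctx_dims labels (decode_row_indices_py idx N ctx_dims labels)

-- ===== LEMMAS AND PROOFS =====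

-- A's digit loop: the LSB-first digit list, as iterated floor division
theorem pv_digits (N : Int) (l : List Int) :
    ∀ (acc : List Int) (x : Int),
      (l.foldl (fun (s : List Int × Int) _ =>
        (s.1 ++ [PySem.Int.mod s.2 N], PySem.Int.floordiv s.2 N)) (acc, x)).1
      = acc ++ (List.range l.length).map
          (fun j => PySem.Int.mod ((fun y => PySem.Int.floordiv y N)^[j] x) N) := by
  induction l with
  | nil => intro acc x; simp
  | cons a t ih =>
    intro acc x
    rw [List.foldl_cons, ih, List.length_cons, List.range_succ_eq_map, List.map_cons,
      List.map_map, List.append_assoc, List.singleton_append]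
    simp [Function.comp_def, Function.iterate_succ_apply]

-- B's column fold: column j holds the j-th digit of every row
theorem pv_cols (N : Int) (base : List Int) (l : List Int) :
    ∀ (cs : List (List Int)) (ys : List Int),
      (l.foldl (fun (s : List Int × List (List Int)) _ =>
        (s.1.map (fun x => PySem.Int.floordiv x N),
         s.2 ++ [s.1.map (fun x => PySem.List.pyGetD base (PySem.Int.mod x N) 0)])) (ys, cs)).2
      = cs ++ (List.range l.length).map (fun j =>
          ys.map (fun x => PySem.List.pyGetD base
            (PySem.Int.mod ((fun y => PySem.Int.floordiv y N)^[j] x) N) 0)) := by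
  induction l with
  | nil => intro cs ys; simp
  | cons a t ih =>
    intro cs ys
    rw [List.foldl_cons, ih, List.length_cons, List.range_succ_eq_map, List.map_cons,
      List.map_map, List.append_assoc, List.singleton_append]
    simp [Function.comp_def, Function.iterate_succ_apply, List.map_map]

-- reversing a map over range flips the index
theorem pv_reverse_map_range {α : Type} (g : Nat → α) (n : Nat) :
    ((List.range n).map g).reverse = (List.range n).map (fun i => g (n - 1 - i)) := by
  apply List.ext_getElem
  · simp
  · intro i h1 h2
    simp only [List.length_reverse, List.length_map, List.length_range] at h1
    simp [List.getElem_reverse, List.getElem_map, List.getElem_range]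

-- the outer append-fold accumulates a map
theorem pv_foldl_append {α β : Type} (f : α → β) (xs : List α) :
    ∀ acc : List β, xs.foldl (fun out r => out ++ [f r]) acc = acc ++ xs.map f := by
  induction xs with
  | nil => intro acc; simp
  | cons a t ih => intro acc; rw [List.foldl_cons, ih]; simp

-- per-row: reading row i of the reversed digit columns is row i of A's reversed digit list
theorem pv_row {dig : Nat → Int → Int} (base : List Int) (m : Nat) (idx : List Int)
    (i : Nat) (hi : i < idx.length) :
    ((List.range m).map (fun j => dig j idx[i])).reverse.map
        (fun k => PySem.List.pyGetD base k 0)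
    = ((List.range m).map (fun j => idx.map (fun x =>
          PySem.List.pyGetD base (dig j x) 0))).reverse.map
        (fun col => PySem.List.pyGetD col (i : Int) 0) := by
  rw [pv_reverse_map_range, pv_reverse_map_range]
  simp only [List.map_map]
  apply List.map_congr_left
  intro j _
  simp only [Function.comp_apply]
  rw [PySem.List.pyGetD_natCast]
  simp [List.getD_eq_getElem?_getD, hi]

-- ===== VERDICT (by name: the statement is the Claim_ definition above) =====
theorem decode_row_indices_py_spec : Claim_equal_decode_row_indices_py := by
  intro idx N cd labels _ _
  show _ = _
  unfold decode_row_indices_py decode_row_indices_py_alt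
  have hmain :
      (idx.foldl (fun out r =>
        out ++ [(((PySem.List.pyRange 0 cd 1).foldl (fun (s : List Int × Int) _ =>
          (s.1 ++ [PySem.Int.mod s.2 N], PySem.Int.floordiv s.2 N)) ([], r)).1.reverse).map
          (fun k => PySem.List.pyGetD (if labels.getD [] = [] then PySem.List.pyRange 0 N 1 else labels.getD []) k 0)]) [])
      = (PySem.List.pyRange 0 (idx.length : Int) 1).map (fun j =>
          (((PySem.List.pyRange 0 cd 1).foldl (fun (s : List Int × List (List Int)) _ =>
            (s.1.map (fun x => PySem.Int.floordiv x N),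
             s.2 ++ [s.1.map (fun x => PySem.List.pyGetD (if labels.getD [] = [] then PySem.List.pyRange 0 N 1 else labels.getD []) (PySem.Int.mod x N) 0)])) (idx.map (fun r => r), [])).2.reverse).map
            (fun col => PySem.List.pyGetD col j 0)) := by
    set base := if labels.getD [] = [] then PySem.List.pyRange 0 N 1 else labels.getD [] with hbase
    rw [pv_foldl_append, List.nil_append, List.map_id', pv_cols N base _ [] idx, List.nil_append]
    simp only [PySem.List.pyRange_one, zero_add, sub_zero, Int.toNat_natCast,
      List.map_map, List.length_map, List.length_range]
    apply List.ext_getElem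
    · simp
    · intro i h1' h2'
      simp only [List.length_map, List.length_range] at h2'
      simp only [List.getElem_map, List.getElem_range, Function.comp_apply]
      rw [pv_digits N _ [] idx[i], List.nil_append]
      simp only [List.length_map, List.length_range]
      exact pv_row (dig := fun j x => PySem.Int.mod ((fun y => PySem.Int.floordiv y N)^[j] x) N) base cd.toNat idx i h2'
  exact hmain
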